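-- pv_equiv track=rewrite | github.com/hayama17/infra-jong | backend/game/tiles.py | can_hotfix
-- ===== SOURCE A (Python) =====
-- VALID_TERMS = [
--     "SLI", "SLO", "SLA", "SRE",
--     "RTO", "RPO",
--     "HPA", "VPA", "CPA", "OPA",
--     "OCI", "CNI", "CSI", "CRI",
--     "POD", "IDP", "IAC", "CRD", "PVC", "SVC",
--     "DNS", "TLS", "VPN", "CDN",
--     "PKI", "SSO",
--     "IAM", "K8S", "SDK",
--     "APM",
--     "NOC",
-- ]
--
-- def can_hotfix(hand: list[str], discarded_tile: str) -> bool: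
--     """
--     Check if a player can perform Hotfix (pon) with the discarded tile.
--     Hotfix requires having 2 tiles that, together with the discarded tile, form a complete term.
--     """
--     # Try adding the discarded tile and see if any 3-tile subset forms a valid term
--     test_hand = hand + [discarded_tile]
--     from itertools import combinations, permutations
--
--     for indices in combinations(range(len(test_hand)), 3):
--         if len(test_hand) - 1 in indices:  # discarded tile must be included
--             subset = [test_hand[i] for i in indices]
--             for perm in permutations(subset):
--                 if "".join(perm) in VALID_TERMS:
--                     return True
--     return False
-- ===== SOURCE B (Python) =====
-- VALID_TERMS = [
--     "SLI", "SLO", "SLA", "SRE",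
--     "RTO", "RPO",
--     "HPA", "VPA", "CPA", "OPA",
--     "OCI", "CNI", "CSI", "CRI",
--     "POD", "IDP", "IAC", "CRD", "PVC", "SVC",
--     "DNS", "TLS", "VPN", "CDN",
--     "PKI", "SSO",
--     "IAM", "K8S", "SDK",
--     "APM",
--     "NOC",
-- ]
--
-- def can_hotfix(hand: list[str], discarded_tile: str) -> bool:
--     """
--     One pass over the hand to build a Counter, then a constant amount of work:
--     for each valid term, try every way to split it into three (possibly empty)
--     pieces, one piece being the discarded tile; the other two pieces must be
--     available in the hand (at two distinct positions, i.e. with multiplicity).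
--     """
--     from collections import Counter
--     counts = Counter(hand)
--     for term in VALID_TERMS:
--         n = len(term)
--         for a in range(n + 1):
--             for b in range(a, n + 1):
--                 p0, p1, p2 = term[:a], term[a:b], term[b:]
--                 for dp, x, y in ((p0, p1, p2), (p1, p0, p2), (p2, p0, p1)):
--                     if dp == discarded_tile:
--                         if x == y:
--                             if counts[x] >= 2:
--                                 return True
--                         elif counts[x] >= 1 and counts[y] >= 1:
--                             return True
--     return False
-- ===== Notes on version B (the rewrite author's own statement) =====
-- stated objective: faster
-- what changed: Instead of enumerating all 3-index combinations of hand+[discarded] and joining all 6 permutations of each subset, B builds a Counter of the hand once and, for each valid term, checks the constant number of 3-way splits of the term that use the discarded tile as one piece, looking the two remaining pieces up in the Counter.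
import Mathlib
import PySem

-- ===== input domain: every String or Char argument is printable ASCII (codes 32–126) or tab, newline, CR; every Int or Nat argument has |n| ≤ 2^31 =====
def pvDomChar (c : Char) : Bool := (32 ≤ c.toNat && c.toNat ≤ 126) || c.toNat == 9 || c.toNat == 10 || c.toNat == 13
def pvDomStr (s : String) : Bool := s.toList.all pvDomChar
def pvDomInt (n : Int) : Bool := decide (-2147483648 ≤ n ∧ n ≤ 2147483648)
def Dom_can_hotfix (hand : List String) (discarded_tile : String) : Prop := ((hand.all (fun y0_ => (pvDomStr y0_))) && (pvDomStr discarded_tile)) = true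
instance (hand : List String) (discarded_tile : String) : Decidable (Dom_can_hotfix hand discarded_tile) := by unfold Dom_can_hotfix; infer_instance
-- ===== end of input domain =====

-- B replaces A's scan over all 3-index combinations (with all 6 permutations joined and
-- looked up in a list) by one Counter pass over the hand plus, per valid term, a constant
-- number of 3-way splits of the term checked against the Counter.

def VALID_TERMS : List String := [
    "SLI", "SLO", "SLA", "SRE",
    "RTO", "RPO",
    "HPA", "VPA", "CPA", "OPA",
    "OCI", "CNI", "CSI", "CRI",
    "POD", "IDP", "IAC", "CRD", "PVC", "SVC",
    "DNS", "TLS", "VPN", "CDN",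
    "PKI", "SSO",
    "IAM", "K8S", "SDK",
    "APM",
    "NOC"]

-- ===== PORT A =====
def can_hotfix (hand : List String) (discarded_tile : String) : Bool :=
  let test_hand := hand ++ [discarded_tile]
  (PySem.List.combinations (PySem.List.pyRange 0 (PySem.List.len test_hand) 1) 3).any
    (fun indices =>
      if indices.contains (PySem.List.len test_hand - 1) then
        let subset := indices.map (fun i => PySem.List.pyGetD test_hand i "")
        (PySem.List.permutations subset 3).any
          (fun perm => VALID_TERMS.contains (PySem.Str.join "" perm))
      else false)

-- ===== PORT B =====
def can_hotfix_alt (hand : List String) (discarded_tile : String) : Bool :=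
  let counts := PySem.Dict.counter hand
  VALID_TERMS.any (fun term =>
    let n := PySem.Str.len term
    (PySem.List.pyRange 0 (n + 1) 1).any (fun a =>
      (PySem.List.pyRange a (n + 1) 1).any (fun b =>
        let p0 := PySem.Str.slice term none (some a)
        let p1 := PySem.Str.slice term (some a) (some b)
        let p2 := PySem.Str.slice term (some b) none
        [(p0, p1, p2), (p1, p0, p2), (p2, p0, p1)].any
          (fun tr => tr.1 == discarded_tile &&
            (if tr.2.1 == tr.2.2 then decide (2 ≤ counts.getD tr.2.1 0)
             else decide (1 ≤ counts.getD tr.2.1 0) && decide (1 ≤ counts.getD tr.2.2 0))))))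

-- ===== PRECONDITION & SPEC =====
def Spec_can_hotfix (hand : List String) (discarded_tile : String) (out : Bool) : Prop := out = can_hotfix_alt hand discarded_tile
instance (hand : List String) (discarded_tile : String) (out : Bool) : Decidable (Spec_can_hotfix hand discarded_tile out) := by unfold Spec_can_hotfix; infer_instance

-- ===== CLAIM (what is proved, stated in full; the proofs are below) =====
def Claim_equal_can_hotfix : Prop := ∀ (hand : List String) (discarded_tile : String), Dom_can_hotfix hand discarded_tile → Spec_can_hotfix hand discarded_tile (can_hotfix hand discarded_tile)

-- ===== LEMMAS AND PROOFS =====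

-- "".join of a three-element list
def jn (u v w : String) : String := PySem.Str.join "" [u, v, w]

-- the six joins A tests for a pair of hand tiles x, y and the discarded tile d
def J6 (x y d : String) : Prop :=
  jn x y d ∈ VALID_TERMS ∨ jn x d y ∈ VALID_TERMS ∨ jn y x d ∈ VALID_TERMS ∨
  jn y d x ∈ VALID_TERMS ∨ jn d x y ∈ VALID_TERMS ∨ jn d y x ∈ VALID_TERMS

-- "the pair x, y (in this or the swapped order) occurs at two distinct positions of the hand"
def SP (hand : List String) (x y : String) : Prop :=
  [x, y].Sublist hand ∨ [y, x].Sublist hand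

lemma jn_toList (u v w : String) : (jn u v w).toList = u.toList ++ v.toList ++ w.toList := by
  simp [jn, PySem.Str.toList_join, PySem.Chars.join_cons_cons, PySem.Chars.join_singleton]

lemma perm3 (a b c : String) : PySem.List.permutations [a, b, c] 3 =
    [[a,b,c],[a,c,b],[b,a,c],[b,c,a],[c,a,b],[c,b,a]] := rfl

-- a 3-element sublist of range (m+1) containing m is [i, j, m] with i < j < m
lemma combo3_iff (m : Nat) (c : List Nat) :
    (c.Sublist (List.range (m + 1)) ∧ c.length = 3 ∧ m ∈ c) ↔
    ∃ i j, i < j ∧ j < m ∧ c = [i, j, m] := by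
  constructor
  · rintro ⟨hs, hl, hm⟩
    have hp := List.pairwise_lt_range.sublist hs
    have hb : ∀ x ∈ c, x < m + 1 := fun x hx => List.mem_range.mp (hs.mem hx)
    match c, hl with
    | [a, b, k], _ =>
      have hab : a < b := List.rel_of_pairwise_cons hp (by simp)
      have hbk : b < k := List.rel_of_pairwise_cons (List.pairwise_cons.mp hp).2 (by simp)
      have hkk := hb k (by simp)
      have hk : k = m := by
        rcases List.mem_cons.mp hm with h | h
        · omega
        · rcases List.mem_cons.mp h with h' | h'
          · omega
          · simp at h'; omega
      exact ⟨a, b, hab, by omega, by rw [hk]⟩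
  · rintro ⟨i, j, hij, hjm, rfl⟩
    refine ⟨?_, rfl, by simp⟩
    have hlen : (List.range (m+1)).length = m + 1 := by simp
    have hsub := List.map_getElem_sublist
      (l := List.range (m+1))
      (is := [⟨i, by omega⟩, ⟨j, by omega⟩, ⟨m, by omega⟩])
      (by simp [List.pairwise_cons]; omega)
    simpa using hsub

lemma pair_sublist_getD (hand : List String) (i j : Nat) (hij : i < j) (hj : j < hand.length) :
    [hand.getD i "", hand.getD j ""].Sublist hand := by
  have hsub := List.map_getElem_sublist
    (l := hand) (is := [⟨i, by omega⟩, ⟨j, hj⟩])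
    (by simp [List.pairwise_cons]; omega)
  simpa [List.getD_eq_getElem?_getD, List.getElem?_eq_getElem, hj, (by omega : i < hand.length)] using hsub

lemma sublist_pair_exists {hand : List String} {x y : String} (h : [x, y].Sublist hand) :
    ∃ i j, i < j ∧ j < hand.length ∧ hand.getD i "" = x ∧ hand.getD j "" = y := by
  obtain ⟨is, heq, hp⟩ := List.sublist_eq_map_getElem h
  match is, heq with
  | [a, b], heq =>
    have hab : (a : Nat) < b := List.rel_of_pairwise_cons hp (by simp)
    simp at heq
    exact ⟨a, b, hab, b.isLt, by
      simp [List.getD_eq_getElem?_getD, a.isLt, b.isLt, heq.1.symm, heq.2.symm]⟩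

lemma pair_sublist_of_mem_ne {α} {x y : α} : ∀ {l : List α}, x ∈ l → y ∈ l → x ≠ y →
    [x, y].Sublist l ∨ [y, x].Sublist l := by
  intro l hx hy hne
  induction l with
  | nil => simp at hx
  | cons a l ih =>
    rcases List.mem_cons.mp hx with rfl | hx'
    · left
      exact (List.cons_sublist_cons ..).mpr (List.singleton_sublist.mpr (by
        rcases List.mem_cons.mp hy with rfl | hy'
        · exact absurd rfl hne
        · exact hy'))
    · rcases List.mem_cons.mp hy with rfl | hy'
      · right
        exact (List.cons_sublist_cons ..).mpr (List.singleton_sublist.mpr hx')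
      · rcases ih hx' hy' with h | h
        · exact Or.inl (h.cons a)
        · exact Or.inr (h.cons a)

lemma count2_iff (hand : List String) (x : String) : 2 ≤ hand.count x ↔ [x, x].Sublist hand := by
  rw [← List.replicate_sublist_iff (n := 2)]
  norm_num [List.replicate]

lemma getD_append_left (hand : List String) (d : String) (i : Nat) (h : i < hand.length) :
    (hand ++ [d]).getD i "" = hand.getD i "" := by
  simp [List.getD_eq_getElem?_getD, List.getElem?_append_left h]

lemma getD_append_last (hand : List String) (d : String) :
    (hand ++ [d]).getD hand.length "" = d := by
  simp [List.getD_eq_getElem?_getD]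

-- A's search succeeds iff some 2-element sublist of the hand passes the 6-permutation test
lemma A_iff (hand : List String) (d : String) :
    can_hotfix hand d = true ↔ ∃ x y, [x, y].Sublist hand ∧ J6 x y d := by
  unfold can_hotfix
  simp only [PySem.List.len_eq, List.length_append, List.length_singleton]
  rw [PySem.List.pyRange_zero_natCast (hand.length + 1)]
  rw [show ((hand.length + 1 : Nat) : Int) - 1 = (hand.length : Int) by push_cast; ring]
  rw [PySem.List.combinations_map]
  rw [List.any_eq_true]
  constructor
  · rintro ⟨c, hc, hf⟩
    obtain ⟨c0, hc0, rfl⟩ := List.mem_map.mp hc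
    obtain ⟨hsub, hlen⟩ := (PySem.List.mem_combinations_iff _ _ _).mp hc0
    by_cases hmem : (c0.map (fun k : Nat => (k : Int))).contains ((hand.length : Int))
    swap
    · rw [if_neg (by exact_mod_cast hmem)] at hf; simp at hf
    rw [if_pos hmem] at hf
    have hm : hand.length ∈ c0 := by
      obtain ⟨a, ha, hb⟩ := List.contains_iff_exists_mem_beq.mp hmem
      obtain ⟨a0, ha0, rfl⟩ := List.mem_map.mp ha
      have : ((hand.length : Int)) = (a0 : Int) := by
        have := beq_iff_eq.mp hb; omega
      have : hand.length = a0 := by omega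
      rwa [this]
    obtain ⟨i, j, hij, hjm, rfl⟩ := (combo3_iff hand.length c0).mp ⟨hsub, hlen, hm⟩
    refine ⟨hand.getD i "", hand.getD j "", pair_sublist_getD hand i j hij hjm, ?_⟩
    simp only [List.map_cons, List.map_nil, PySem.List.pyGetD_natCast] at hf
    rw [getD_append_left hand d i (by omega), getD_append_left hand d j hjm,
        getD_append_last hand d, perm3, List.any_eq_true] at hf
    obtain ⟨p, hp, hcont⟩ := hf
    obtain ⟨t, ht, hbt⟩ := List.contains_iff_exists_mem_beq.mp hcont
    have : PySem.Str.join "" p = t := beq_iff_eq.mp hbt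
    unfold J6 jn
    fin_cases hp <;> rw [this] <;> tauto
  · rintro ⟨x, y, hsubl, hJ⟩
    obtain ⟨i, j, hij, hjm, hx, hy⟩ := sublist_pair_exists hsubl
    refine ⟨[(i : Int), (j : Int), (hand.length : Int)], ?_, ?_⟩
    · apply List.mem_map.mpr
      have h3 := (combo3_iff hand.length [i, j, hand.length]).mpr ⟨i, j, hij, hjm, rfl⟩
      exact ⟨[i, j, hand.length], (PySem.List.mem_combinations_iff _ _ _).mpr ⟨h3.1, h3.2.1⟩, by simp⟩
    · have hmem : ([(i : Int), (j : Int), (hand.length : Int)]).contains ((hand.length : Int)) := by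
        simp
      rw [if_pos hmem]
      simp only [List.map_cons, List.map_nil, PySem.List.pyGetD_natCast]
      rw [getD_append_left hand d i (by omega), getD_append_left hand d j hjm,
          getD_append_last hand d, hx, hy, perm3, List.any_eq_true]
      unfold J6 jn at hJ
      rcases hJ with h | h | h | h | h | h
      · exact ⟨[x, y, d], by simp, by simpa using h⟩
      · exact ⟨[x, d, y], by simp, by simpa using h⟩
      · exact ⟨[y, x, d], by simp, by simpa using h⟩
      · exact ⟨[y, d, x], by simp, by simpa using h⟩
      · exact ⟨[d, x, y], by simp, by simpa using h⟩
      · exact ⟨[d, y, x], by simp, by simpa using h⟩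

-- B's counter test characterised: the two remaining parts occur at distinct positions
lemma cnt_iff (hand : List String) (x y : String) :
    ((if x = y then decide (2 ≤ (PySem.Dict.counter hand).getD x 0)
      else decide (1 ≤ (PySem.Dict.counter hand).getD x 0) &&
           decide (1 ≤ (PySem.Dict.counter hand).getD y 0)) = true) ↔ SP hand x y := by
  unfold SP
  rw [PySem.Dict.getD_counter, PySem.Dict.getD_counter]
  by_cases hxy : x = y
  · subst hxy
    rw [if_pos rfl, decide_eq_true_iff]
    rw [show ((2:Int) ≤ (hand.count x : Int)) ↔ 2 ≤ hand.count x by exact_mod_cast Iff.rfl]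
    rw [count2_iff]
    exact ⟨fun h => Or.inl h, fun h => h.elim id id⟩
  · rw [if_neg hxy]
    simp only [Bool.and_eq_true, decide_eq_true_iff]
    constructor
    · rintro ⟨h1, h2⟩
      have hx : x ∈ hand := List.count_pos_iff.mp (by exact_mod_cast h1)
      have hy : y ∈ hand := List.count_pos_iff.mp (by exact_mod_cast h2)
      exact pair_sublist_of_mem_ne hx hy hxy
    · rintro (h | h)
      · have hx : x ∈ hand := h.mem (by simp)
        have hy : y ∈ hand := h.mem (by simp)
        constructor <;>
          · rw [show ((1:Int) ≤ (hand.count _ : Int)) ↔ 1 ≤ hand.count _ by exact_mod_cast Iff.rfl]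
            simp [hx, hy]
      · have hx : x ∈ hand := h.mem (by simp)
        have hy : y ∈ hand := h.mem (by simp)
        constructor <;>
          · rw [show ((1:Int) ≤ (hand.count _ : Int)) ↔ 1 ≤ hand.count _ by exact_mod_cast Iff.rfl]
            simp [hx, hy]

-- enumerating split points (a, b) of t is the same as enumerating decompositions t = u ++ v ++ w
lemma split_iff (t : String) (P : String → String → String → Prop) :
    (∃ a : Int, (0 ≤ a ∧ a < PySem.Str.len t + 1) ∧ ∃ b : Int, (a ≤ b ∧ b < PySem.Str.len t + 1) ∧
      P (PySem.Str.slice t none (some a)) (PySem.Str.slice t (some a) (some b))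
        (PySem.Str.slice t (some b) none)) ↔
    (∃ u v w, t = jn u v w ∧ P u v w) := by
  constructor
  · rintro ⟨a, ⟨ha0, haL⟩, b, ⟨hab, hbL⟩, hP⟩
    refine ⟨_, _, _, ?_, hP⟩
    apply String.toList_inj.mp
    rw [jn_toList]
    rw [PySem.Str.toList_slice, PySem.Str.toList_slice, PySem.Str.toList_slice]
    rw [PySem.Chars.slice_eq_listSlice, PySem.Chars.slice_eq_listSlice, PySem.Chars.slice_eq_listSlice]
    have hb0 : (0:Int) ≤ b := le_trans ha0 hab
    rw [PySem.List.slice_to _ ha0, PySem.List.slice_toNat _ ha0 hb0, PySem.List.slice_from _ hb0]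
    have hd : List.drop b.toNat t.toList = List.drop (b.toNat - a.toNat) (List.drop a.toNat t.toList) := by
      rw [List.drop_drop]; congr 1; omega
    rw [hd, List.append_assoc, List.take_append_drop, List.take_append_drop]
  · rintro ⟨u, v, w, rfl, hP⟩
    have hlen : (jn u v w).toList.length = u.toList.length + v.toList.length + w.toList.length := by
      rw [jn_toList]; simp [Nat.add_assoc]
    refine ⟨(u.toList.length : Int), ⟨Int.natCast_nonneg _, ?_⟩,
      ((u.toList.length + v.toList.length : Nat) : Int),
      ⟨by exact_mod_cast Nat.le_add_right _ _, ?_⟩, ?_⟩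
    · rw [PySem.Str.len_eq, hlen]; push_cast; omega
    · rw [PySem.Str.len_eq, hlen]; push_cast; omega
    · have h0 : (PySem.Str.slice (jn u v w) none (some (u.toList.length : Int))) = u := by
        apply String.toList_inj.mp
        rw [PySem.Str.toList_slice, PySem.Chars.slice_eq_listSlice,
            PySem.List.slice_to _ (Int.natCast_nonneg _), jn_toList, Int.toNat_natCast,
            List.append_assoc, List.take_left]
      have h1 : (PySem.Str.slice (jn u v w) (some (u.toList.length : Int))
          (some ((u.toList.length + v.toList.length : Nat) : Int))) = v := by
        apply String.toList_inj.mp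
        rw [PySem.Str.toList_slice, PySem.Chars.slice_eq_listSlice,
            PySem.List.slice_toNat _ (Int.natCast_nonneg _) (Int.natCast_nonneg _), jn_toList,
            Int.toNat_natCast, Int.toNat_natCast, List.append_assoc, List.drop_left]
        have h : u.toList.length + v.toList.length - u.toList.length = v.toList.length := by omega
        rw [h, List.take_left]
      have hlw : List.drop (u.toList.length + v.toList.length) (u.toList ++ v.toList ++ w.toList) = w.toList := by
        rw [show u.toList.length + v.toList.length = (u.toList ++ v.toList).length from (List.length_append).symm,
            List.drop_left]
      have h2 : (PySem.Str.slice (jn u v w)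
          (some ((u.toList.length + v.toList.length : Nat) : Int)) none) = w := by
        apply String.toList_inj.mp
        rw [PySem.Str.toList_slice, PySem.Chars.slice_eq_listSlice,
            PySem.List.slice_from _ (Int.natCast_nonneg _), jn_toList, Int.toNat_natCast, hlw]
      rw [h0, h1, h2]
      exact hP

lemma B_iff (hand : List String) (d : String) :
    can_hotfix_alt hand d = true ↔
    ∃ t ∈ VALID_TERMS, ∃ u v w, t = jn u v w ∧
      ((u = d ∧ SP hand v w) ∨ (v = d ∧ SP hand u w) ∨ (w = d ∧ SP hand u v)) := by
  unfold can_hotfix_alt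
  rw [List.any_eq_true]
  apply exists_congr; intro t
  apply and_congr_right; intro ht
  rw [List.any_eq_true]
  rw [← split_iff t (fun u v w => (u = d ∧ SP hand v w) ∨ (v = d ∧ SP hand u w) ∨ (w = d ∧ SP hand u v))]
  apply exists_congr; intro a
  constructor
  · rintro ⟨ha, hf⟩
    refine ⟨PySem.List.mem_pyRange_one.mp ha, ?_⟩
    rw [List.any_eq_true] at hf
    obtain ⟨b, hb, hg⟩ := hf
    refine ⟨b, PySem.List.mem_pyRange_one.mp hb, ?_⟩
    simp only [List.any_cons, List.any_nil, Bool.or_false, Bool.or_eq_true, Bool.and_eq_true,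
      beq_iff_eq] at hg
    rcases hg with ⟨h1, h2⟩ | ⟨h1, h2⟩ | ⟨h1, h2⟩
    · exact Or.inl ⟨h1, (cnt_iff hand _ _).mp h2⟩
    · exact Or.inr (Or.inl ⟨h1, (cnt_iff hand _ _).mp h2⟩)
    · exact Or.inr (Or.inr ⟨h1, (cnt_iff hand _ _).mp h2⟩)
  · rintro ⟨ha, b, hb, hP⟩
    refine ⟨PySem.List.mem_pyRange_one.mpr ha, ?_⟩
    rw [List.any_eq_true]
    refine ⟨b, PySem.List.mem_pyRange_one.mpr hb, ?_⟩
    simp only [List.any_cons, List.any_nil, Bool.or_false, Bool.or_eq_true, Bool.and_eq_true,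
      beq_iff_eq]
    rcases hP with ⟨h1, h2⟩ | ⟨h1, h2⟩ | ⟨h1, h2⟩
    · exact Or.inl ⟨h1, (cnt_iff hand _ _).mpr h2⟩
    · exact Or.inr (Or.inl ⟨h1, (cnt_iff hand _ _).mpr h2⟩)
    · exact Or.inr (Or.inr ⟨h1, (cnt_iff hand _ _).mpr h2⟩)

lemma main_iff (hand : List String) (d : String) :
    (∃ x y, [x, y].Sublist hand ∧ J6 x y d) ↔
    (∃ t ∈ VALID_TERMS, ∃ u v w, t = jn u v w ∧
      ((u = d ∧ SP hand v w) ∨ (v = d ∧ SP hand u w) ∨ (w = d ∧ SP hand u v))) := by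
  constructor
  · rintro ⟨x, y, hs, hJ⟩
    unfold J6 at hJ
    rcases hJ with h | h | h | h | h | h
    · exact ⟨_, h, x, y, d, rfl, Or.inr (Or.inr ⟨rfl, Or.inl hs⟩)⟩
    · exact ⟨_, h, x, d, y, rfl, Or.inr (Or.inl ⟨rfl, Or.inl hs⟩)⟩
    · exact ⟨_, h, y, x, d, rfl, Or.inr (Or.inr ⟨rfl, Or.inr hs⟩)⟩
    · exact ⟨_, h, y, d, x, rfl, Or.inr (Or.inl ⟨rfl, Or.inr hs⟩)⟩
    · exact ⟨_, h, d, x, y, rfl, Or.inl ⟨rfl, Or.inl hs⟩⟩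
    · exact ⟨_, h, d, y, x, rfl, Or.inl ⟨rfl, Or.inr hs⟩⟩
  · rintro ⟨t, ht, u, v, w, rfl, hc⟩
    unfold J6
    rcases hc with ⟨rfl, hsp | hsp⟩ | ⟨rfl, hsp | hsp⟩ | ⟨rfl, hsp | hsp⟩
    · exact ⟨v, w, hsp, Or.inr (Or.inr (Or.inr (Or.inr (Or.inl ht))))⟩
    · exact ⟨w, v, hsp, Or.inr (Or.inr (Or.inr (Or.inr (Or.inr ht))))⟩
    · exact ⟨u, w, hsp, Or.inr (Or.inl ht)⟩
    · exact ⟨w, u, hsp, Or.inr (Or.inr (Or.inr (Or.inl ht)))⟩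
    · exact ⟨u, v, hsp, Or.inl ht⟩
    · exact ⟨v, u, hsp, Or.inr (Or.inr (Or.inl ht))⟩

-- ===== VERDICT (by name: the statement is the Claim_ definition above) =====
theorem can_hotfix_spec : Claim_equal_can_hotfix := by
  intro hand d _
  unfold Spec_can_hotfix
  exact Bool.coe_iff_coe.mp (((A_iff hand d).trans (main_iff hand d)).trans (B_iff hand d).symm)
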